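-- pv_equiv track=rewrite | github.com/devesesam/trip-ideas-mcp-bookit-01 | execution/normalize/select_golden_candidates.py | _broad_place_type
-- ===== SOURCE A (Python) =====
-- def _broad_place_type(tags: list[str]) -> str:
--     """Map a tag list to a coarse place-type bucket for diversity sampling."""
--     if not tags:
--         return "untagged"
--     tagset = {t.lower() for t in tags if t}
--     # Order matters — first match wins
--     rules = [
--         ("beach", {"beaches", "coastal walks", "coastal cliffs", "sea caves", "tidal lagoons"}),
--         ("alpine", {"alpine routes", "mountains", "glaciers", "high country", "glacial lakes"}),
--         ("water", {"lakes", "rivers", "lakeside walk", "wetlands", "waterfalls"}),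
--         ("forest", {"forests", "forest walks", "rainforest", "kauri forests", "podocarp forests", "beech forests"}),
--         ("urban", {"urban walks", "city walks", "art galleries", "museums", "architecture", "botanic gardens"}),
--         ("heritage", {"historic sites", "historical sites", "heritage precincts", "memorials", "mining history"}),
--         ("track", {"tramps", "great walks", "multi-day walks", "te araroa", "te araroa trail"}),
--         ("walk", {"walks", "short walks", "scenic loops", "boardwalks", "hikes"}),
--         ("reserve", {"national parks", "regional parks", "scenic reserves", "marine reserves"}),
--         ("scenic_drive", {"scenic drive", "scenic drives"}),
--         ("lookout", {"lookouts"}),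
--     ]
--     for label, marker_tags in rules:
--         if tagset & marker_tags:
--             return label
--     return "other"
-- ===== SOURCE B (Python) =====
-- # Different data structure: one flat literal dict marker-tag -> (rule priority, bucket label);
-- # a single pass over the tags keeps the lowest-priority hit (earlier rule = smaller priority).
-- _BUCKET = {
--     "beaches": (0, "beach"), "coastal walks": (0, "beach"), "coastal cliffs": (0, "beach"),
--     "sea caves": (0, "beach"), "tidal lagoons": (0, "beach"),
--     "alpine routes": (1, "alpine"), "mountains": (1, "alpine"), "glaciers": (1, "alpine"),
--     "high country": (1, "alpine"), "glacial lakes": (1, "alpine"),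
--     "lakes": (2, "water"), "rivers": (2, "water"), "lakeside walk": (2, "water"),
--     "wetlands": (2, "water"), "waterfalls": (2, "water"),
--     "forests": (3, "forest"), "forest walks": (3, "forest"), "rainforest": (3, "forest"),
--     "kauri forests": (3, "forest"), "podocarp forests": (3, "forest"), "beech forests": (3, "forest"),
--     "urban walks": (4, "urban"), "city walks": (4, "urban"), "art galleries": (4, "urban"),
--     "museums": (4, "urban"), "architecture": (4, "urban"), "botanic gardens": (4, "urban"),
--     "historic sites": (5, "heritage"), "historical sites": (5, "heritage"),
--     "heritage precincts": (5, "heritage"), "memorials": (5, "heritage"), "mining history": (5, "heritage"),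
--     "tramps": (6, "track"), "great walks": (6, "track"), "multi-day walks": (6, "track"),
--     "te araroa": (6, "track"), "te araroa trail": (6, "track"),
--     "walks": (7, "walk"), "short walks": (7, "walk"), "scenic loops": (7, "walk"),
--     "boardwalks": (7, "walk"), "hikes": (7, "walk"),
--     "national parks": (8, "reserve"), "regional parks": (8, "reserve"),
--     "scenic reserves": (8, "reserve"), "marine reserves": (8, "reserve"),
--     "scenic drive": (9, "scenic_drive"), "scenic drives": (9, "scenic_drive"),
--     "lookouts": (10, "lookout"),
-- }
--
--
-- def _broad_place_type(tags: list[str]) -> str: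
--     """Map a tag list to a coarse place-type bucket for diversity sampling."""
--     if not tags:
--         return "untagged"
--     best = None
--     for t in tags:
--         if t:
--             hit = _BUCKET.get(t.lower())
--             if hit is not None and (best is None or hit[0] < best[0]):
--                 best = hit
--     return best[1] if best is not None else "other"
-- ===== Notes on version B (the rewrite author's own statement) =====
-- stated objective: alternative
-- what changed: A lowers the tags into a set and scans the 11 ordered rules, returning the label of the first rule whose marker set intersects it; B uses one flat literal dict marker-tag -> (priority, label) and a single pass over the tags tracking the hit with the minimum priority (earlier-rule-wins encoded as minimum index), with no rule scan at all.
import Mathlib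
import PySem

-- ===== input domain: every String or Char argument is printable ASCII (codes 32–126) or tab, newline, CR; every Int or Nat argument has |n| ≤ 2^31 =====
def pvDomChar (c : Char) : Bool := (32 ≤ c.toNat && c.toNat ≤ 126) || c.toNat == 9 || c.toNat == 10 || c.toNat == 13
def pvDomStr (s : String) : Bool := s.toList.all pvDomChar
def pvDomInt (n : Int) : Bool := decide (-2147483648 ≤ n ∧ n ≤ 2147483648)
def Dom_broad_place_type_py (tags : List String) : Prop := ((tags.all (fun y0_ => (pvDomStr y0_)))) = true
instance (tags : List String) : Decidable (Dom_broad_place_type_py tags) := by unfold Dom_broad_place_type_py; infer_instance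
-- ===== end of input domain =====

-- B replaces A's ordered rule-set scan by one flat marker -> (priority, label) dictionary and a
-- single min-priority pass over the tags (alternative data structure, same results).


-- ===== PORT A =====
-- A's rules table: each marker set is a Python set literal of distinct strings.
def rulesA : List (String × PySem.Set String) :=
  [("beach", PySem.Set.ofList ["beaches", "coastal walks", "coastal cliffs", "sea caves", "tidal lagoons"]),
   ("alpine", PySem.Set.ofList ["alpine routes", "mountains", "glaciers", "high country", "glacial lakes"]),
   ("water", PySem.Set.ofList ["lakes", "rivers", "lakeside walk", "wetlands", "waterfalls"]),
   ("forest", PySem.Set.ofList ["forests", "forest walks", "rainforest", "kauri forests", "podocarp forests", "beech forests"]),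
   ("urban", PySem.Set.ofList ["urban walks", "city walks", "art galleries", "museums", "architecture", "botanic gardens"]),
   ("heritage", PySem.Set.ofList ["historic sites", "historical sites", "heritage precincts", "memorials", "mining history"]),
   ("track", PySem.Set.ofList ["tramps", "great walks", "multi-day walks", "te araroa", "te araroa trail"]),
   ("walk", PySem.Set.ofList ["walks", "short walks", "scenic loops", "boardwalks", "hikes"]),
   ("reserve", PySem.Set.ofList ["national parks", "regional parks", "scenic reserves", "marine reserves"]),
   ("scenic_drive", PySem.Set.ofList ["scenic drive", "scenic drives"]),
   ("lookout", PySem.Set.ofList ["lookouts"])]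

-- A's 'for label, marker_tags in rules: if tagset & marker_tags: return label' / 'return "other"'.
def loopA (tagset : PySem.Set String) : List (String × PySem.Set String) → String
  | [] => "other"
  | (label, ms) :: rest =>
    if PySem.Set.inter tagset ms ≠ [] then label else loopA tagset rest

def broad_place_type_py (tags : List String) : String :=
  if tags = [] then "untagged"
  else
    let tagset : PySem.Set String :=
      PySem.Set.ofList ((tags.filter (fun t => t ≠ "")).map PySem.Str.lower)
    loopA tagset rulesA

-- ===== PORT B =====
-- _BUCKET: a flat Python dict literal (distinct keys, insertion order) marker -> (priority, label).
def bucketB : PySem.Dict String (Int × String) :=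
  PySem.Dict.mk
    [("beaches", (0, "beach")), ("coastal walks", (0, "beach")), ("coastal cliffs", (0, "beach")),
     ("sea caves", (0, "beach")), ("tidal lagoons", (0, "beach")),
     ("alpine routes", (1, "alpine")), ("mountains", (1, "alpine")), ("glaciers", (1, "alpine")),
     ("high country", (1, "alpine")), ("glacial lakes", (1, "alpine")),
     ("lakes", (2, "water")), ("rivers", (2, "water")), ("lakeside walk", (2, "water")),
     ("wetlands", (2, "water")), ("waterfalls", (2, "water")),
     ("forests", (3, "forest")), ("forest walks", (3, "forest")), ("rainforest", (3, "forest")),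
     ("kauri forests", (3, "forest")), ("podocarp forests", (3, "forest")), ("beech forests", (3, "forest")),
     ("urban walks", (4, "urban")), ("city walks", (4, "urban")), ("art galleries", (4, "urban")),
     ("museums", (4, "urban")), ("architecture", (4, "urban")), ("botanic gardens", (4, "urban")),
     ("historic sites", (5, "heritage")), ("historical sites", (5, "heritage")),
     ("heritage precincts", (5, "heritage")), ("memorials", (5, "heritage")), ("mining history", (5, "heritage")),
     ("tramps", (6, "track")), ("great walks", (6, "track")), ("multi-day walks", (6, "track")),
     ("te araroa", (6, "track")), ("te araroa trail", (6, "track")),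
     ("walks", (7, "walk")), ("short walks", (7, "walk")), ("scenic loops", (7, "walk")),
     ("boardwalks", (7, "walk")), ("hikes", (7, "walk")),
     ("national parks", (8, "reserve")), ("regional parks", (8, "reserve")),
     ("scenic reserves", (8, "reserve")), ("marine reserves", (8, "reserve")),
     ("scenic drive", (9, "scenic_drive")), ("scenic drives", (9, "scenic_drive")),
     ("lookouts", (10, "lookout"))]

def broad_place_type_py_alt (tags : List String) : String :=
  if tags = [] then "untagged"
  else
    let best : Option (Int × String) :=
      tags.foldl
        (fun best t =>
          if t = "" then best
          else
            match bucketB.get? (PySem.Str.lower t) with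
            | none => best
            | some hit =>
              match best with
              | none => some hit
              | some b => if hit.1 < b.1 then some hit else best)
        none
    match best with
    | none => "other"
    | some b => b.2

-- ===== PRECONDITION & SPEC =====
def Spec_broad_place_type_py (tags : List String) (out : String) : Prop := out = broad_place_type_py_alt tags
instance (tags : List String) (out : String) : Decidable (Spec_broad_place_type_py tags out) := by unfold Spec_broad_place_type_py; infer_instance

-- ===== CLAIM (what is proved, stated in full; the proofs are below) =====
def Claim_equal_broad_place_type_py : Prop := ∀ (tags : List String), Dom_broad_place_type_py tags → Spec_broad_place_type_py tags (broad_place_type_py tags)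

-- ===== LEMMAS AND PROOFS =====

-- Proof-side view of the rule table (A's rules without the set wrappers).
def ruleList : List (String × List String) :=
  [("beach", ["beaches", "coastal walks", "coastal cliffs", "sea caves", "tidal lagoons"]),
   ("alpine", ["alpine routes", "mountains", "glaciers", "high country", "glacial lakes"]),
   ("water", ["lakes", "rivers", "lakeside walk", "wetlands", "waterfalls"]),
   ("forest", ["forests", "forest walks", "rainforest", "kauri forests", "podocarp forests", "beech forests"]),
   ("urban", ["urban walks", "city walks", "art galleries", "museums", "architecture", "botanic gardens"]),
   ("heritage", ["historic sites", "historical sites", "heritage precincts", "memorials", "mining history"]),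
   ("track", ["tramps", "great walks", "multi-day walks", "te araroa", "te araroa trail"]),
   ("walk", ["walks", "short walks", "scenic loops", "boardwalks", "hikes"]),
   ("reserve", ["national parks", "regional parks", "scenic reserves", "marine reserves"]),
   ("scenic_drive", ["scenic drive", "scenic drives"]),
   ("lookout", ["lookouts"])]

-- Priority function read directly off a rules list: first rule (from base index b)
-- whose marker list contains t.
def dfun : List (String × List String) → Int → String → Option Int
  | [], _, _ => none
  | (_, ms) :: rest, b, t => if t ∈ ms then some b else dfun rest (b + 1) t

-- Label of the rule at offset k (as an Int) of a rules list.
def labelAt : List (String × List String) → Int → String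
  | [], _ => "other"
  | (l, _) :: rest, k => if k = 0 then l else labelAt rest (k - 1)

def outOf (rs : List (String × List String)) (b : Int) : Option Int → String
  | none => "other"
  | some p => labelAt rs (p - b)

-- B's loop step over (priority, label) pairs, abstracted over the lookup function.
def stepP (f : String → Option (Int × String)) (best : Option (Int × String)) (t : String) :
    Option (Int × String) :=
  match f t with
  | none => best
  | some hit =>
    match best with
    | none => some hit
    | some b => if hit.1 < b.1 then some hit else best

-- The same step on bare priorities.
def ominStep (f : String → Option Int) (best : Option Int) (t : String) : Option Int :=
  match f t with
  | none => best
  | some p =>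
    match best with
    | none => some p
    | some b => if p < b then some p else best

def minL (L : List String) (f : String → Option Int) : Option Int :=
  L.foldl (ominStep f) none

theorem dfun_bounds (rs : List (String × List String)) (b : Int) (t : String) (p : Int)
    (h : dfun rs b t = some p) : b ≤ p ∧ p < b + rs.length := by
  induction rs generalizing b with
  | nil => simp [dfun] at h
  | cons r rest ih =>
    obtain ⟨l, ms⟩ := r
    simp only [dfun] at h
    split at h
    · cases h; simp
    · have := ih (b + 1) h
      simp only [List.length_cons]
      omega

theorem foldl_ominStep_some (L : List String) (f : String → Option Int) (a : Int) :
    L.foldl (ominStep f) (some a) = some ((L.filterMap f).foldl min a) := by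
  induction L generalizing a with
  | nil => simp
  | cons t L ih =>
    cases hf : f t with
    | none => simp [List.foldl_cons, ominStep, hf, ih]
    | some p =>
      have hst : ominStep f (some a) t = some (min a p) := by
        simp only [ominStep, hf]
        rcases lt_or_ge p a with h | h
        · rw [if_pos h]; congr 1; omega
        · rw [if_neg (not_lt.mpr h)]; congr 1; omega
      simp [List.foldl_cons, hst, hf, ih]

theorem minL_eq_min? (L : List String) (f : String → Option Int) :
    minL L f = (L.filterMap f).min? := by
  induction L with
  | nil => simp [minL]
  | cons t L ih =>
    cases hf : f t with
    | none =>
      simp only [minL, List.foldl_cons, ominStep, hf, List.filterMap_cons]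
      exact ih
    | some p =>
      simp only [minL, List.foldl_cons, ominStep, hf, List.filterMap_cons]
      rw [foldl_ominStep_some, List.min?_cons']

-- minL only reads f on members of L.
theorem minL_congr (L : List String) (f g : String → Option Int)
    (h : ∀ t ∈ L, f t = g t) : minL L f = minL L g := by
  rw [minL_eq_min?, minL_eq_min?]
  congr 1
  exact List.filterMap_congr h

-- Nonempty Python set intersection, as an existential over the underlying list.
theorem inter_ne_nil_iff (L : List String) (ms : List String) :
    PySem.Set.inter (PySem.Set.ofList L) ms ≠ [] ↔ ∃ t ∈ L, t ∈ ms := by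
  constructor
  · intro h
    rcases List.exists_mem_of_ne_nil _ h with ⟨x, hx⟩
    have := (PySem.Set.mem_inter (PySem.Set.ofList L) ms x).mp hx
    exact ⟨x, (PySem.Set.mem_ofList _ _).mp this.1, this.2⟩
  · rintro ⟨t, htL, htm⟩ hnil
    have : t ∈ PySem.Set.inter (PySem.Set.ofList L) ms :=
      (PySem.Set.mem_inter _ _ _).mpr ⟨(PySem.Set.mem_ofList _ _).mpr htL, htm⟩
    simp [hnil] at this

-- Key lemma: A's first-match rule loop equals B's min-priority over the tags,
-- for any rules list, by induction with a shifted base index.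
theorem key (rs : List (String × List String)) (b : Int) (L : List String) :
    loopA (PySem.Set.ofList L) (rs.map (fun p => (p.1, PySem.Set.ofList p.2)))
      = outOf rs b (minL L (dfun rs b)) := by
  induction rs generalizing b with
  | nil =>
    have hnone : minL L (dfun [] b) = none := by
      rw [minL_eq_min?]
      have : L.filterMap (dfun [] b) = [] := by
        simp [dfun]
      rw [this]; rfl
    simp [loopA, hnone, outOf]
  | cons r rest ih =>
    obtain ⟨l, ms⟩ := r
    simp only [List.map_cons, loopA]
    by_cases hx : ∃ t ∈ L, t ∈ ms
    · -- some tag matches this rule: A returns l, B's min is exactly b.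
      obtain ⟨t0, ht0L, ht0m⟩ := hx
      rw [if_pos ((inter_ne_nil_iff _ _).mpr ⟨t0, ht0L, (PySem.Set.mem_ofList _ _).mpr ht0m⟩)]
      have hmin : minL L (dfun ((l, ms) :: rest) b) = some b := by
        rw [minL_eq_min?]
        rw [List.min?_eq_some_iff]
        constructor
        · exact List.mem_filterMap.mpr ⟨t0, ht0L, by simp [dfun, ht0m]⟩
        · intro q hq
          rcases List.mem_filterMap.mp hq with ⟨t, _, hft⟩
          exact (dfun_bounds _ _ _ _ hft).1
      rw [hmin]
      simp [outOf, labelAt]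
    · -- no tag matches this rule: drop to the tail with base b+1.
      push Not at hx
      have hnil2 : PySem.Set.inter (PySem.Set.ofList L) (PySem.Set.ofList ms) = [] := by
        by_contra hne
        rcases (inter_ne_nil_iff _ _).mp hne with ⟨t, htL, htm⟩
        exact hx t htL ((PySem.Set.mem_ofList _ _).mp htm)
      rw [if_neg (by simp [hnil2])]
      have hcong : minL L (dfun ((l, ms) :: rest) b) = minL L (dfun rest (b + 1)) := by
        apply minL_congr
        intro t htL
        simp [dfun, hx t htL]
      rw [hcong, ih (b + 1)]
      cases ho : minL L (dfun rest (b + 1)) with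
      | none => rfl
      | some p =>
        have hp : b + 1 ≤ p := by
          rw [minL_eq_min?] at ho
          have hmem := (List.min?_eq_some_iff.mp ho).1
          rcases List.mem_filterMap.mp hmem with ⟨t, _, hft⟩
          exact (dfun_bounds _ _ _ _ hft).1
        simp only [outOf, labelAt]
        rw [if_neg (by omega)]
        congr 1
        omega

-- rulesA is ruleList with each marker list read as a set (all lists are duplicate-free).
theorem rulesA_eq : rulesA = ruleList.map (fun p => (p.1, PySem.Set.ofList p.2)) := by decide

-- bucketB's lookup is dfun on ruleList, paired with the rule's label.
set_option maxRecDepth 40000 in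
theorem bucket_get (t : String) :
    bucketB.get? t = (dfun ruleList 0 t).map (fun p => (p, labelAt ruleList p)) := by
  by_cases h : t ∈ ["beaches", "coastal walks", "coastal cliffs", "sea caves", "tidal lagoons",
      "alpine routes", "mountains", "glaciers", "high country", "glacial lakes",
      "lakes", "rivers", "lakeside walk", "wetlands", "waterfalls",
      "forests", "forest walks", "rainforest", "kauri forests", "podocarp forests", "beech forests",
      "urban walks", "city walks", "art galleries", "museums", "architecture", "botanic gardens",
      "historic sites", "historical sites", "heritage precincts", "memorials", "mining history",
      "tramps", "great walks", "multi-day walks", "te araroa", "te araroa trail",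
      "walks", "short walks", "scenic loops", "boardwalks", "hikes",
      "national parks", "regional parks", "scenic reserves", "marine reserves",
      "scenic drive", "scenic drives", "lookouts"]
  case pos =>
    fin_cases h <;> decide
  case neg =>
    simp only [List.mem_cons, List.not_mem_nil, or_false, not_or] at h
    obtain ⟨h1, h2, h3, h4, h5, h6, h7, h8, h9, h10, h11, h12, h13, h14, h15, h16, h17, h18,
      h19, h20, h21, h22, h23, h24, h25, h26, h27, h28, h29, h30, h31, h32, h33, h34, h35,
      h36, h37, h38, h39, h40, h41, h42, h43, h44, h45, h46, h47, h48, h49⟩ := h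
    have hd : dfun ruleList 0 t = none := by
      simp [dfun, ruleList, h1, h2, h3, h4, h5, h6, h7, h8, h9, h10, h11, h12, h13, h14, h15,
        h16, h17, h18, h19, h20, h21, h22, h23, h24, h25, h26, h27, h28, h29, h30, h31, h32,
        h33, h34, h35, h36, h37, h38, h39, h40, h41, h42, h43, h44, h45, h46, h47, h48, h49]
    have hk : t ∉ bucketB.keys := by
      intro hk
      have : bucketB.keys = ["beaches", "coastal walks", "coastal cliffs", "sea caves", "tidal lagoons",
        "alpine routes", "mountains", "glaciers", "high country", "glacial lakes",
        "lakes", "rivers", "lakeside walk", "wetlands", "waterfalls",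
        "forests", "forest walks", "rainforest", "kauri forests", "podocarp forests", "beech forests",
        "urban walks", "city walks", "art galleries", "museums", "architecture", "botanic gardens",
        "historic sites", "historical sites", "heritage precincts", "memorials", "mining history",
        "tramps", "great walks", "multi-day walks", "te araroa", "te araroa trail",
        "walks", "short walks", "scenic loops", "boardwalks", "hikes",
        "national parks", "regional parks", "scenic reserves", "marine reserves",
        "scenic drive", "scenic drives", "lookouts"] := by decide
      rw [this] at hk
      simp only [List.mem_cons, List.not_mem_nil, or_false] at hk
      tauto
    rw [(PySem.Dict.get?_eq_none_iff_not_mem_keys _ _).mpr hk, hd]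
    rfl

-- The pair fold is the priority fold decorated with the (priority-determined) label.
theorem foldl_stepP_proj (L : List String) (f : String → Option (Int × String))
    (fI : String → Option Int) (g : Int → String)
    (hfg : ∀ t ∈ L, f t = (fI t).map (fun p => (p, g p))) (accI : Option Int) :
    L.foldl (stepP f) (accI.map (fun p => (p, g p)))
      = (L.foldl (ominStep fI) accI).map (fun p => (p, g p)) := by
  induction L generalizing accI with
  | nil => simp
  | cons t L ih =>
    have hstep : stepP f (accI.map (fun p => (p, g p))) t
        = (ominStep fI accI t).map (fun p => (p, g p)) := by
      rw [stepP, hfg t (by simp)]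
      cases hI : fI t with
      | none => simp [ominStep, hI]
      | some p =>
        cases accI with
        | none => simp [ominStep, hI]
        | some b =>
          simp only [ominStep, hI]
          by_cases hlt : p < b <;> simp [hlt]
    rw [List.foldl_cons, List.foldl_cons, hstep, ih (fun t ht => hfg t (by simp [ht]))]

-- B's tag loop is the stepP fold over the lowered nonempty tags.
theorem b_loop_eq (tags : List String) :
    tags.foldl
        (fun best t =>
          if t = "" then best
          else
            match bucketB.get? (PySem.Str.lower t) with
            | none => best
            | some hit =>
              match best with
              | none => some hit
              | some b => if hit.1 < b.1 then some hit else best)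
        none
      = ((tags.filter (fun t => t ≠ "")).map PySem.Str.lower).foldl (stepP bucketB.get?) none := by
  rw [List.foldl_map, List.foldl_filter]
  have hfun : (fun (best : Option (Int × String)) (t : String) =>
        if t = "" then best
        else
          match bucketB.get? (PySem.Str.lower t) with
          | none => best
          | some hit =>
            match best with
            | none => some hit
            | some b => if hit.1 < b.1 then some hit else best)
      = (fun (best : Option (Int × String)) (t : String) =>
          if decide (t ≠ "") = true then stepP bucketB.get? best (PySem.Str.lower t) else best) := by
    funext best t
    by_cases h : t = "" <;> simp [h, stepP]
  rw [hfun]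

theorem broad_place_type_py_spec : Claim_equal_broad_place_type_py := by
  intro tags _
  unfold Spec_broad_place_type_py
  by_cases hnil : tags = []
  · simp [broad_place_type_py, broad_place_type_py_alt, hnil]
  · simp only [broad_place_type_py, broad_place_type_py_alt, if_neg hnil]
    set L := (tags.filter (fun t => t ≠ "")).map PySem.Str.lower with hL
    rw [rulesA_eq, key ruleList 0 L, b_loop_eq, ← hL]
    have hfold := foldl_stepP_proj L bucketB.get? (dfun ruleList 0) (fun p => labelAt ruleList p)
      (fun t _ => bucket_get t) none
    simp only [Option.map_none] at hfold
    rw [hfold, show List.foldl (ominStep (dfun ruleList 0)) none L = minL L (dfun ruleList 0) from rfl]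
    cases ho : minL L (dfun ruleList 0) with
    | none => rfl
    | some p =>
      simp only [outOf, Option.map_some]
      congr 1
      omega
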